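-- pv_equiv track=rewrite | github.com/python/cpython | Lib/_bootsubprocess.py | _check_cmd
-- ===== SOURCE A (Python) =====
-- def _check_cmd(cmd):
--     # Use regex [a-zA-Z0-9./-]+: reject empty string, space, etc.
--     safe_chars = []
--     for first, last in (("a", "z"), ("A", "Z"), ("0", "9")):
--         for ch in range(ord(first), ord(last) + 1):
--             safe_chars.append(chr(ch))
--     safe_chars.append("./-")
--     safe_chars = ''.join(safe_chars)
--
--     if isinstance(cmd, (tuple, list)):
--         check_strs = cmd
--     elif isinstance(cmd, str):
--         check_strs = [cmd]
--     else:
--         return False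
--
--     for arg in check_strs:
--         if not isinstance(arg, str):
--             return False
--         if not arg:
--             # reject empty string
--             return False
--         for ch in arg:
--             if ch not in safe_chars:
--                 return False
--
--     return True
-- ===== SOURCE B (Python) =====
-- import re
--
-- _SAFE_ARG = re.compile(r'[a-zA-Z0-9./-]+')
--
-- def _check_cmd(cmd):
--     if isinstance(cmd, (tuple, list)):
--         args = cmd
--     elif isinstance(cmd, str):
--         args = [cmd]
--     else:
--         return False
--     return all(isinstance(a, str) and _SAFE_ARG.fullmatch(a) is not None
--                for a in args)
-- ===== Notes on version B (the rewrite author's own statement) =====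
-- stated objective: idiomatic
-- what changed: Replaces the hand-built safe-character string and the nested per-character membership loops by a precompiled regex fullmatch of [a-zA-Z0-9./-]+ inside a single all(...) over the arguments; the '+' quantifier subsumes the empty-string check.
import Mathlib
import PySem

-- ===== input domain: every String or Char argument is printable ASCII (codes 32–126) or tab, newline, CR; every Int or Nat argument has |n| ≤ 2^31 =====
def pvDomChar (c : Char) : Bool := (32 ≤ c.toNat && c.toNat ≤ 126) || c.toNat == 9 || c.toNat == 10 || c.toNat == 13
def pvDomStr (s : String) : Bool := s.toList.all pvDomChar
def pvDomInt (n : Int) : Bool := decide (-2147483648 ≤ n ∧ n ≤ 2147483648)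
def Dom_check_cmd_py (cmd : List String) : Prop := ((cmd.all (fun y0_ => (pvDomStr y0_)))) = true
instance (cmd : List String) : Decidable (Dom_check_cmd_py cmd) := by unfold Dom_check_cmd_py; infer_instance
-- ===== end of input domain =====

-- B replaces A's hand-built safe-character string and nested per-character loops by a single
-- regex fullmatch against [a-zA-Z0-9./-]+ inside an all(...) over the arguments (idiomatic).
-- Under the List String signature, Python's isinstance dispatch is fixed to the list branch.

-- ===== PORT A =====
-- builds safe_chars exactly as A does: three chr-ranges appended in order, then "./-" joined on.
def pvSafeChars : List Char :=
  ([("a", "z"), ("A", "Z"), ("0", "9")] : List (String × String)).foldl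
    (fun acc p =>
      acc ++ (List.range' p.1.toList.head!.toNat
                (p.2.toList.head!.toNat + 1 - p.1.toList.head!.toNat)).map Char.ofNat)
    [] ++ "./-".toList

-- the outer `for arg in check_strs` loop with its early returns
def pvCheckArgs : List String → Bool
  | [] => true
  | arg :: rest =>
    if arg.toList.isEmpty then false              -- `if not arg: return False`
    else if arg.toList.any (fun ch => !(pvSafeChars.contains ch)) then false
                                                  -- inner `for ch in arg: if ch not in safe_chars: return False`
    else pvCheckArgs rest

def check_cmd_py (cmd : List String) : Bool :=
  -- isinstance(cmd, (tuple, list)) holds: check_strs = cmd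
  pvCheckArgs cmd

-- ===== PORT B =====
-- fullmatch of the character class: c matches [a-zA-Z0-9./-]
def pvIsSafe (c : Char) : Bool :=
  ('a' ≤ c && c ≤ 'z') || ('A' ≤ c && c ≤ 'Z') || ('0' ≤ c && c ≤ '9')
    || c == '.' || c == '/' || c == '-'

def check_cmd_py_alt (cmd : List String) : Bool :=
  -- all(_SAFE_ARG.fullmatch(a) is not None for a in cmd); '+' forces nonemptiness
  cmd.all (fun a => !a.toList.isEmpty && a.toList.all pvIsSafe)

-- ===== PRECONDITION & SPEC =====
def Spec_check_cmd_py (cmd : List String) (out : Bool) : Prop := out = check_cmd_py_alt cmd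
instance (cmd : List String) (out : Bool) : Decidable (Spec_check_cmd_py cmd out) := by unfold Spec_check_cmd_py; infer_instance

-- ===== CLAIM (what is proved, stated in full; the proofs are below) =====
def Claim_equal_check_cmd_py : Prop := ∀ (cmd : List String), Dom_check_cmd_py cmd → Spec_check_cmd_py cmd (check_cmd_py cmd)

-- ===== LEMMAS AND PROOFS =====
theorem pvSafeChars_eq :
    pvSafeChars = (List.range' 97 26).map Char.ofNat ++ (List.range' 65 26).map Char.ofNat
      ++ (List.range' 48 10).map Char.ofNat ++ ['.', '/', '-'] := by
  decide

theorem mem_range'_map_ofNat (s n : Nat) (c : Char) (hv : s + n ≤ 0xD800) :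
    c ∈ (List.range' s n).map Char.ofNat ↔ (s ≤ c.toNat ∧ c.toNat < s + n) := by
  constructor
  · rintro hm
    simp only [List.mem_map, List.mem_range'_1] at hm
    obtain ⟨k, hk, rfl⟩ := hm
    have hval : k.isValidChar := Or.inl (by omega)
    have : (Char.ofNat k).toNat = k := by simp [Char.toNat_ofNat, hval]
    omega
  · rintro ⟨h1, h2⟩
    simp only [List.mem_map, List.mem_range'_1]
    exact ⟨c.toNat, ⟨h1, by omega⟩, Char.ofNat_toNat c⟩

theorem contains_safeChars (c : Char) : pvSafeChars.contains c = pvIsSafe c := by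
  have hle : ∀ a b : Char, (a ≤ b) ↔ a.toNat ≤ b.toNat := fun a b => ge_iff_le
  have heqP : ∀ d : Char, (c = d) ↔ c.toNat = d.toNat := by
    intro d
    constructor
    · rintro rfl; rfl
    · intro h
      have h2 := Char.ofNat_toNat c
      rw [h, Char.ofNat_toNat d] at h2
      exact h2.symm
  have heqB : ∀ d : Char, (c == d) = decide (c.toNat = d.toNat) := by
    intro d; rw [Bool.beq_eq_decide_eq, decide_eq_decide, heqP]
  rw [pvSafeChars_eq, pvIsSafe]
  simp only [List.contains_eq_mem, List.mem_append,
    mem_range'_map_ofNat 97 26 c (by norm_num), mem_range'_map_ofNat 65 26 c (by norm_num),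
    mem_range'_map_ofNat 48 10 c (by norm_num), List.mem_cons, List.not_mem_nil, or_false,
    heqP, heqB, Bool.and_eq_decide, Bool.or_eq_decide, hle]
  rw [decide_eq_decide]
  have hd : ('.' : Char).toNat = 46 := rfl
  have hs : ('/' : Char).toNat = 47 := rfl
  have hm : ('-' : Char).toNat = 45 := rfl
  have ha : ('a' : Char).toNat = 97 := rfl
  have hz : ('z' : Char).toNat = 122 := rfl
  have hA : ('A' : Char).toNat = 65 := rfl
  have hZ : ('Z' : Char).toNat = 90 := rfl
  have h0 : ('0' : Char).toNat = 48 := rfl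
  have h9 : ('9' : Char).toNat = 57 := rfl
  rw [hd, hs, hm, ha, hz, hA, hZ, h0, h9]
  simp only [decide_eq_true_eq]
  omega

theorem pvCheckArgs_eq (cmd : List String) :
    pvCheckArgs cmd = cmd.all (fun a => !a.toList.isEmpty && a.toList.all pvIsSafe) := by
  induction cmd with
  | nil => rfl
  | cons arg rest ih =>
    have hany : (arg.toList.any fun ch => !(pvSafeChars.contains ch))
        = !(arg.toList.all pvIsSafe) := by
      induction arg.toList with
      | nil => rfl
      | cons x xs ihx =>
        simp only [contains_safeChars] at ihx ⊢
        simp only [List.any_cons, List.all_cons, ihx, Bool.not_and]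
    rw [List.all_cons, ← ih]
    show (if arg.toList.isEmpty then false
          else if arg.toList.any (fun ch => !(pvSafeChars.contains ch)) then false
          else pvCheckArgs rest) = _
    rw [hany]
    cases h1 : arg.toList.isEmpty <;> cases h2 : arg.toList.all pvIsSafe <;> simp

-- ===== VERDICT (by name: the statement is the Claim_ definition above) =====
theorem check_cmd_py_spec : Claim_equal_check_cmd_py := by
  intro cmd _
  unfold Spec_check_cmd_py check_cmd_py check_cmd_py_alt
  exact pvCheckArgs_eq cmd
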